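-- pv_equiv track=rewrite | github.com/chicanagram/seq-analysis | msa/reformat_msa.py | remove_gapped_cols
-- ===== SOURCE A (Python) =====
-- def remove_gapped_cols(seqs, threshold):
--     # Remove columns with >= threshold% gaps
--     if not seqs: return seqs
--     length = len(seqs[0])
--     gap_count = [0]*length
--     nseq = len(seqs)
--     for s in seqs:
--         for i,ch in enumerate(s):
--             if ch in ('.','-'): gap_count[i]+=1
--     keep = [ (gap_count[i]<0.01*threshold*nseq) for i in range(length) ]
--     new_seqs = []
--     for s in seqs:
--         new_s = []
--         for i,ch in enumerate(s):
--             if keep[i]: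
--                 new_s.append(ch)
--         new_seqs.append("".join(new_s))
--     return new_seqs
-- ===== SOURCE B (Python) =====
-- def remove_gapped_cols(seqs, threshold):
--     # Transpose into padded columns (None = row exhausted), filter whole columns, transpose back.
--     if not seqs: return seqs
--     nseq = len(seqs)
--     width = max(len(s) for s in seqs)
--     cols = [[s[i] if i < len(s) else None for s in seqs] for i in range(width)]
--     cols = [col for col in cols
--             if sum(c in ('.', '-') for c in col if c is not None) < 0.01 * threshold * nseq]
--     return ["".join(col[r] for col in cols if col[r] is not None) for r in range(nseq)]
-- ===== Notes on version B (the rewrite author's own statement) =====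
-- stated objective: alternative
-- what changed: B transposes the alignment into padded columns (None past a row's end), filters whole columns by their gap count, and transposes back, instead of A's index-counting array plus per-row index re-scan; Pre_ excludes only the inputs where A raises IndexError (a row longer than the first).
import Mathlib
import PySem

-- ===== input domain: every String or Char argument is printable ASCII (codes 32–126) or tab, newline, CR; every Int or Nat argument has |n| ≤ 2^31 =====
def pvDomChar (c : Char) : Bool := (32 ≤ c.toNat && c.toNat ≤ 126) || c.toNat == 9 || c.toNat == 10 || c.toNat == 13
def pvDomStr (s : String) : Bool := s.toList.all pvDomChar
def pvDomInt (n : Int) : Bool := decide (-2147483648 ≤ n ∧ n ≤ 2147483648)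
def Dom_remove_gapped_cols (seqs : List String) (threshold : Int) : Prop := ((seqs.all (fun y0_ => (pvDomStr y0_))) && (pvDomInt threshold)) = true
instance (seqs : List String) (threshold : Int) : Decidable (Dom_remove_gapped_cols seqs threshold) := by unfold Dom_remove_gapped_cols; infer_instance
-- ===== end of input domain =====

-- B re-implements the column filter by transposing, filtering whole columns and transposing
-- back (alternative decomposition, same asymptotic cost); return values only, no mutation.

-- shared helpers: Python's `ch in ('.','-')` test and an EXACT integer model of the
-- IEEE-754 double computation `gap_count < 0.01*threshold*nseq` (0.01 is the double
-- 5764607523034235 * 2^-59; each `*` rounds once to 53 bits, round-half-to-even).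
def gapChar (c : Char) : Bool := c == '.' || c == '-'

-- round a nonneg integer significand to 53 bits, round-half-to-even; returns (mantissa, shift)
def pvRoundMant (a : Nat) : Nat × Nat :=
  if a < 2 ^ 53 then (a, 0)
  else
    let s := a.log2 - 52
    let q := a / 2 ^ s
    let r := a % 2 ^ s
    let h := 2 ^ (s - 1)
    (if h < r || (r == h && q % 2 == 1) then q + 1 else q, s)

-- multiply the double m*2^e by the integer t, rounding once (exact for all test ranges)
def pvFmulInt (m : Int) (e : Int) (t : Int) : Int × Int :=
  let p := m * t
  let qs := pvRoundMant p.natAbs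
  (if p < 0 then -(qs.1 : Int) else (qs.1 : Int), e + (qs.2 : Int))

-- Python's `k < 0.01 * t * n` for ints k, t, n (exact)
def pvKeepLt (k : Int) (t : Int) (n : Int) : Bool :=
  let f1 := pvFmulInt 5764607523034235 (-59) t
  let f2 := pvFmulInt f1.1 f1.2 n
  if 0 ≤ f2.2 then decide (k < f2.1 * 2 ^ f2.2.toNat) else decide (k * 2 ^ (-f2.2).toNat < f2.1)

-- ===== PORT A =====
def remove_gapped_cols (seqs : List String) (threshold : Int) : List String :=
  if seqs = [] then seqs
  else
    let length := (seqs.headD "").toList.length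
    let nseq : Int := seqs.length
    let gap_count : List Int :=
      seqs.foldl
        (fun gc s =>
          (PySem.List.enumerate s.toList 0).foldl
            (fun gc ic =>
              if gapChar ic.2 then gc.set ic.1.toNat (gc.getD ic.1.toNat 0 + 1) else gc)
            gc)
        (List.replicate length 0)
    let keep : List Bool :=
      (List.range length).map (fun i => pvKeepLt (gap_count.getD i 0) threshold nseq)
    seqs.map (fun s =>
      String.ofList
        ((PySem.List.enumerate s.toList 0).foldl
          (fun acc ic => if keep.getD ic.1.toNat false then acc ++ [ic.2] else acc) []))

-- ===== PORT B =====
-- a padded-transpose cell: None once the row is exhausted; its gap test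
def optGap (oc : Option Char) : Bool :=
  match oc with
  | some ch => gapChar ch
  | none => false

def remove_gapped_cols_alt (seqs : List String) (threshold : Int) : List String :=
  if seqs = [] then seqs
  else
    let nseq : Int := seqs.length
    let width := (seqs.map (fun s => s.toList.length)).foldl max 0
    let cols := (List.range width).map (fun i => seqs.map (fun s => s.toList[i]?))
    let kept := cols.filter (fun col => pvKeepLt ((col.countP optGap : Nat) : Int) threshold nseq)
    (List.range seqs.length).map
      (fun r => String.ofList (kept.filterMap (fun col => col.getD r none)))

-- ===== PRECONDITION & SPEC =====
-- Pre_ excludes exactly the inputs on which A raises IndexError (a row strictly longer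
-- than the first row, whose keep-mask lookup runs past len(seqs[0])); A returns on
-- every input admitted here.
def Pre_remove_gapped_cols (seqs : List String) (threshold : Int) : Prop :=
  ∀ s ∈ seqs, s.toList.length ≤ (seqs.headD "").toList.length
instance (seqs : List String) (threshold : Int) : Decidable (Pre_remove_gapped_cols seqs threshold) := by unfold Pre_remove_gapped_cols; infer_instance

def pvWitness_remove_gapped_cols : List String × Int := (["AB-", "A.C"], 40)

def Spec_remove_gapped_cols (seqs : List String) (threshold : Int) (out : List String) : Prop := out = remove_gapped_cols_alt seqs threshold
instance (seqs : List String) (threshold : Int) (out : List String) : Decidable (Spec_remove_gapped_cols seqs threshold out) := by unfold Spec_remove_gapped_cols; infer_instance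

-- ===== CLAIM (what is proved, stated in full; the proofs are below) =====
def Claim_equal_remove_gapped_cols : Prop := ∀ (seqs : List String) (threshold : Int), Dom_remove_gapped_cols seqs threshold → Pre_remove_gapped_cols seqs threshold → Spec_remove_gapped_cols seqs threshold (remove_gapped_cols seqs threshold)
-- ===== LEMMAS AND PROOFS =====

-- filter a list of chars by a (possibly shorter) boolean mask, missing entries = false
def maskFilter : List Char → List Bool → List Char
  | [], _ => []
  | c :: cs, ks => (if ks.headD false then [c] else []) ++ maskFilter cs ks.tail

-- A's gap-counting inner loop, index-carrying structural form
def gcBump : List Int → Nat → List Char → List Int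
  | gc, _, [] => gc
  | gc, j, c :: cs => gcBump (if gapChar c then gc.set j (gc.getD j 0 + 1) else gc) (j + 1) cs

theorem pv_getD_headD_drop (ks : List Bool) (j : Nat) :
    ks.getD j false = (ks.drop j).headD false := by
  induction ks generalizing j with
  | nil => simp
  | cons k ks ih => cases j with
    | zero => simp
    | succ j => exact ih j

theorem pv_enumFold (keep : List Bool) (l : List Char) :
    ∀ (j : Nat) (acc : List Char),
    (PySem.List.enumerate l (j : Int)).foldl
        (fun acc ic => if keep.getD ic.1.toNat false then acc ++ [ic.2] else acc) acc
      = acc ++ maskFilter l (keep.drop j) := by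
  induction l with
  | nil => intro j acc; simp [PySem.List.enumerate, maskFilter]
  | cons c cs ih =>
    intro j acc
    rw [PySem.List.enumerate_cons, List.foldl_cons]
    have h1 : ((j : Int) + 1) = (((j + 1 : Nat)) : Int) := by push_cast; ring
    rw [h1, ih (j + 1)]
    have hgoal : ∀ (b : Bool) (M : List Char),
        (if b = true then acc ++ [c] else acc) ++ M = acc ++ ((if b = true then [c] else []) ++ M) := by
      intro b M; cases b <;> simp
    simp only [maskFilter]
    rw [Int.toNat_natCast, pv_getD_headD_drop keep j, List.tail_drop]
    exact hgoal _ _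

theorem pv_enumFold0 (keep : List Bool) (l : List Char) :
    (PySem.List.enumerate l 0).foldl
        (fun acc ic => if keep.getD ic.1.toNat false then acc ++ [ic.2] else acc) []
      = maskFilter l keep := by
  simpa using pv_enumFold keep l 0 []

theorem pv_innerFold (l : List Char) :
    ∀ (j : Nat) (gc : List Int),
    (PySem.List.enumerate l (j : Int)).foldl
        (fun gc ic => if gapChar ic.2 then gc.set ic.1.toNat (gc.getD ic.1.toNat 0 + 1) else gc) gc
      = gcBump gc j l := by
  induction l with
  | nil => intro j gc; simp [PySem.List.enumerate, gcBump]
  | cons c cs ih =>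
    intro j gc
    rw [PySem.List.enumerate_cons, List.foldl_cons]
    have h1 : ((j : Int) + 1) = (((j + 1 : Nat)) : Int) := by push_cast; ring
    rw [h1, Int.toNat_natCast, gcBump, ← ih (j + 1)]

theorem pv_gcBump_length (l : List Char) : ∀ (j : Nat) (gc : List Int),
    (gcBump gc j l).length = gc.length := by
  induction l with
  | nil => intro j gc; rfl
  | cons c cs ih =>
    intro j gc
    rw [gcBump, ih]
    by_cases hb : gapChar c <;> simp [hb]

theorem pv_getD_set (gc : List Int) (j i : Nat) (v : Int) (hi : i < gc.length) :
    (gc.set j v).getD i 0 = if j = i then (if j < gc.length then v else gc.getD i 0) else gc.getD i 0 := by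
  rcases eq_or_ne j i with rfl | hne
  · simp [List.getD_eq_getElem?_getD, hi]
  · simp [List.getD_eq_getElem?_getD, hne]

theorem pv_gcBump_getD (l : List Char) : ∀ (j : Nat) (gc : List Int) (i : Nat), i < gc.length →
    (gcBump gc j l).getD i 0
      = gc.getD i 0 + (if j ≤ i ∧ i - j < l.length ∧ gapChar (l.getD (i - j) ' ') then 1 else 0) := by
  induction l with
  | nil => intro j gc i hi; simp [gcBump]
  | cons c cs ih =>
    intro j gc i hi
    rw [gcBump]
    have hlen : (if gapChar c then gc.set j (gc.getD j 0 + 1) else gc).length = gc.length := by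
      by_cases hb : gapChar c <;> simp [hb]
    rw [ih (j + 1) _ i (by rw [hlen]; exact hi)]
    have hset : (if gapChar c then gc.set j (gc.getD j 0 + 1) else gc).getD i 0
        = gc.getD i 0 + (if j = i ∧ gapChar c then 1 else 0) := by
      by_cases hb : gapChar c
      · rw [if_pos hb, pv_getD_set gc j i _ hi]
        rcases eq_or_ne j i with rfl | hne
        · simp [hb, hi]
        · simp [hne]
      · simp [hb]
    rw [hset]
    rcases lt_trichotomy i j with hij | rfl | hij
    · have h1 : ¬ (j + 1 ≤ i) := by omega
      have h2 : ¬ (j ≤ i) := by omega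
      have h3 : j ≠ i := by omega
      simp [h1, h2, h3]
    · have h1 : ¬ (i + 1 ≤ i) := by omega
      simp only [Nat.sub_self, List.getD_cons_zero, h1, false_and, if_false, add_zero,
        List.length_cons]
      by_cases hb : gapChar c <;> simp [hb]
    · have h3 : j ≠ i := by omega
      have h4 : i - j = (i - (j + 1)) + 1 := by omega
      have h5 : (j + 1 ≤ i) = True := by simp; omega
      have h6 : (j ≤ i) = True := by simp; omega
      simp only [h3, false_and, if_false, h4, h5, h6, true_and, List.getD_cons_succ,
        List.length_cons, add_zero, Nat.add_lt_add_iff_right]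

theorem pv_optGap_getElem? (l : List Char) (i : Nat) :
    optGap l[i]? = ((decide (i < l.length)) && gapChar (l.getD i ' ')) := by
  by_cases hi : i < l.length
  · simp [optGap, hi]
  · simp [optGap, hi]

theorem pv_foldRows_getD (rows : List (List Char)) : ∀ (gc : List Int) (i : Nat),
    i < gc.length →
    (rows.foldl (fun g r => gcBump g 0 r) gc).getD i 0
      = gc.getD i 0 + ((rows.map (fun r => r[i]?)).countP optGap : Int) := by
  induction rows with
  | nil => intro gc i hi; simp
  | cons r rs ih =>
    intro gc i hi
    rw [List.foldl_cons]
    have hg : (gcBump gc 0 r).length = gc.length := pv_gcBump_length r 0 gc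
    rw [ih (gcBump gc 0 r) i (by rw [hg]; exact hi)]
    rw [pv_gcBump_getD r 0 gc i hi]
    simp only [List.map_cons, List.countP_cons, Nat.zero_le, Nat.sub_zero, true_and,
      pv_optGap_getElem?]
    by_cases hb : i < r.length ∧ gapChar (r.getD i ' ') <;> simp [hb] <;> ring

-- maskFilter over padded option cells
def maskFilterO : List (Option Char) → List Bool → List Char
  | [], _ => []
  | oc :: os, ks => (if ks.headD false then oc.toList else []) ++ maskFilterO os ks.tail

theorem pv_maskFilterO_pad (m : Nat) : ∀ (ks : List Bool),
    maskFilterO (List.replicate m none) ks = [] := by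
  induction m with
  | zero => intro ks; rfl
  | succ m ih => intro ks; simp [List.replicate_succ, maskFilterO, ih]

theorem pv_maskFilterO_eq (cs : List Char) : ∀ (m : Nat) (ks : List Bool),
    maskFilterO (cs.map some ++ List.replicate m none) ks = maskFilter cs ks := by
  induction cs with
  | nil => intro m ks; simp [maskFilter, pv_maskFilterO_pad]
  | cons c cs ih =>
    intro m ks
    simp only [List.map_cons, List.cons_append, maskFilterO, maskFilter, ih]
    rfl

theorem pv_maskFilterO_filterMap {γ : Type} (P : γ → Bool) (f : γ → Option Char) :
    ∀ (cols : List γ),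
    maskFilterO (cols.map f) (cols.map P) = (cols.filter P).filterMap f := by
  intro cols
  induction cols with
  | nil => simp [maskFilterO]
  | cons col cs ih =>
    simp only [List.map_cons, List.filter_cons]
    rw [maskFilterO]
    simp only [List.headD_cons, List.tail_cons, ih]
    by_cases hb : P col <;> cases hf : f col <;> simp [hb, hf]

theorem pv_range_getElem? (l : List Char) (L : Nat) (hle : l.length ≤ L) :
    (List.range L).map (fun i => l[i]?) = l.map some ++ List.replicate (L - l.length) none := by
  apply List.ext_getElem
  · simp; omega
  · intro i h1 h2
    simp only [List.getElem_map, List.getElem_range]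
    by_cases hi : i < l.length
    · rw [List.getElem_append_left (by simpa using hi), List.getElem_map,
        List.getElem?_eq_getElem hi]
    · rw [List.getElem_append_right (by simpa using hi), List.getElem_replicate,
        List.getElem?_eq_none (Nat.le_of_not_lt hi)]

theorem pv_foldl_max_le (L : Nat) : ∀ (l : List Nat) (a : Nat),
    (∀ x ∈ l, x ≤ L) → a ≤ L → l.foldl max a ≤ L := by
  intro l
  induction l with
  | nil => intro a _ ha; simpa using ha
  | cons x xs ih =>
    intro a hl ha
    rw [List.foldl_cons]
    exact ih (max a x) (fun y hy => hl y (by simp [hy])) (by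
      have := hl x (by simp); omega)

theorem pv_le_foldl_max : ∀ (l : List Nat) (a b : Nat), b ≤ a → b ≤ l.foldl max a := by
  intro l
  induction l with
  | nil => intro a b h; simpa using h
  | cons x xs ih =>
    intro a b h
    rw [List.foldl_cons]
    exact ih (max a x) b (by omega)

theorem pv_main (seqs : List String) (t : Int) (hne : seqs ≠ [])
    (hpre : ∀ s ∈ seqs, s.toList.length ≤ (seqs.headD "").toList.length) :
    remove_gapped_cols seqs t = remove_gapped_cols_alt seqs t := by
  rw [remove_gapped_cols, remove_gapped_cols_alt, if_neg hne, if_neg hne]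
  simp only []
  set L := (seqs.headD "").toList.length with hLdef
  set rows := seqs.map String.toList with hrowsdef
  set P : List (Option Char) → Bool :=
    (fun col => pvKeepLt ((col.countP optGap : Nat) : Int) t (seqs.length : Int)) with hPdef
  set colO : Nat → List (Option Char) := (fun i => seqs.map (fun s => s.toList[i]?)) with hcolOdef
  have hwidth : (seqs.map (fun s => s.toList.length)).foldl max 0 = L := by
    apply Nat.le_antisymm
    · exact pv_foldl_max_le L _ 0
        (by intro x hx; obtain ⟨sx, hsx, rfl⟩ := List.mem_map.mp hx; exact hpre sx hsx)
        (Nat.zero_le L)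
    · cases seqs with
      | nil => exact absurd rfl hne
      | cons a as =>
        simp only [List.map_cons, List.foldl_cons]
        exact pv_le_foldl_max _ _ _ (by simp [hLdef])
  -- A's gap counts
  have hfold : seqs.foldl
      (fun gc s => (PySem.List.enumerate s.toList 0).foldl
        (fun gc ic => if gapChar ic.2 then gc.set ic.1.toNat (gc.getD ic.1.toNat 0 + 1) else gc) gc)
      (List.replicate L 0)
      = rows.foldl (fun g r => gcBump g 0 r) (List.replicate L 0) := by
    rw [hrowsdef, List.foldl_map]
    congr 1
    funext gc s
    simpa using pv_innerFold s.toList 0 gc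
  have hgap : ∀ i < L,
      (rows.foldl (fun g r => gcBump g 0 r) (List.replicate L 0)).getD i 0
        = ((colO i).countP optGap : Int) := by
    intro i hi
    rw [pv_foldRows_getD rows (List.replicate L 0) i (by simpa using hi)]
    have : colO i = rows.map (fun r => r[i]?) := by
      simp [hcolOdef, hrowsdef, List.map_map, Function.comp]
    rw [this]
    simp [List.getD_eq_getElem?_getD, hi]
  have hkeep : (List.range L).map
      (fun i => pvKeepLt ((seqs.foldl
        (fun gc s => (PySem.List.enumerate s.toList 0).foldl
          (fun gc ic => if gapChar ic.2 then gc.set ic.1.toNat (gc.getD ic.1.toNat 0 + 1) else gc) gc)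
        (List.replicate L 0)).getD i 0) t (seqs.length : Int))
      = ((List.range L).map colO).map P := by
    rw [List.map_map]
    apply List.map_congr_left
    intro i hi
    rw [hfold, hgap i (List.mem_range.mp hi)]
    simp [hPdef, Function.comp]
  simp only [hwidth, hkeep, pv_enumFold0]
  apply List.ext_getElem
  · simp
  · intro r h1 h2
    simp only [List.length_map] at h1
    simp only [List.getElem_map, List.getElem_range]
    congr 1
    have hle : seqs[r].toList.length ≤ L := hpre _ (List.getElem_mem h1)
    have hf : ((List.range L).map colO).map (fun col => col.getD r none)
        = (List.range L).map (fun i => seqs[r].toList[i]?) := by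
      rw [List.map_map]
      apply List.map_congr_left
      intro i _
      simp only [Function.comp, hcolOdef]
      rw [List.getD_eq_getElem _ _ (by simpa using h1), List.getElem_map]
    rw [← pv_maskFilterO_filterMap P (fun col => col.getD r none) ((List.range L).map colO),
      hf, pv_range_getElem? _ L hle, pv_maskFilterO_eq]

theorem remove_gapped_cols_spec : Claim_equal_remove_gapped_cols := by
  intro seqs t _ hpre
  unfold Spec_remove_gapped_cols
  by_cases hseqs : seqs = []
  · simp [remove_gapped_cols, remove_gapped_cols_alt, hseqs]
  · exact pv_main seqs t hseqs hpre
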